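-- pv_equiv track=rewrite | github.com/WallyWuCS/event_detection_Wally | event_detection_twitter/event_detection_functions.py | find_word_pair
-- ===== SOURCE A (Python) =====
-- def find_word_pair(word_pairs):
-- # Iterate over the word pairs
--     for pair in word_pairs:
--         # Check if both words in the pair do not start with '//t'
--         if not pair[0].startswith('//t') and not pair[1].startswith('//t'):
--             return ' '.join(pair)
--
--     # If no pair found, check for pairs with one word not starting with '//t'
--     for pair in word_pairs:
--         if not pair[0].startswith('//t'):
--             return ' |'.join(pair)
--         else:
--             if not pair[1].startswith('//t'):
--                 return pair[1] + ' |' + pair[0]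
--         # If no such pair found, skip current function
--     return None
-- ===== SOURCE B (Python) =====
-- def find_word_pair(word_pairs):
--     # Single pass: return immediately on a fully-good pair; remember the
--     # first partially-good pair as a fallback.
--     fallback = None
--     for pair in word_pairs:
--         good0 = not pair[0].startswith('//t')
--         good1 = not pair[1].startswith('//t')
--         if good0 and good1:
--             return ' '.join(pair)
--         if fallback is None:
--             if good0:
--                 fallback = ' |'.join(pair)
--             elif good1:
--                 fallback = pair[1] + ' |' + pair[0]
--     return fallback
-- ===== Notes on version B (the rewrite author's own statement) =====
-- stated objective: simpler
-- what changed: Replaced A's two sequential scans over word_pairs by a single pass that returns immediately on a fully-good pair and remembers the first partially-good pair in a fallback variable.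
import Mathlib
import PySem

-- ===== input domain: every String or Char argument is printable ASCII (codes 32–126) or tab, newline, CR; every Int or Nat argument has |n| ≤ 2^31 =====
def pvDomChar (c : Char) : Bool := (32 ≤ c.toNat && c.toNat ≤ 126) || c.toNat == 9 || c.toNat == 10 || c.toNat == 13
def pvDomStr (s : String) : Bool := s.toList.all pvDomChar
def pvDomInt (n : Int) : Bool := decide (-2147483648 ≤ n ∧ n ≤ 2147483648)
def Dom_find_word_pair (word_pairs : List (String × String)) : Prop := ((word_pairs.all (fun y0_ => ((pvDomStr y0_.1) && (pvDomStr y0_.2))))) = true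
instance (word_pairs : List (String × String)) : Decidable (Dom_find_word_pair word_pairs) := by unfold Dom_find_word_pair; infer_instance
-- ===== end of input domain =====

-- B replaces A's two sequential scans by one pass with a remembered fallback (objective: simpler).

-- ===== PORT A =====
-- first loop of A: first pair with both words not starting with '//t'
def fwpLoop1 : List (String × String) → Option String
  | [] => none
  | p :: t =>
    if !(PySem.Str.startswith p.1 "//t") && !(PySem.Str.startswith p.2 "//t") then
      some (PySem.Str.join " " [p.1, p.2])
    else fwpLoop1 t

-- second loop of A: first pair with at least one word not starting with '//t'
def fwpLoop2 : List (String × String) → Option String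
  | [] => none
  | p :: t =>
    if !(PySem.Str.startswith p.1 "//t") then some (PySem.Str.join " |" [p.1, p.2])
    else if !(PySem.Str.startswith p.2 "//t") then some (PySem.Str.join " |" [p.2, p.1])
    else fwpLoop2 t

def find_word_pair (word_pairs : List (String × String)) : Option String :=
  match fwpLoop1 word_pairs with
  | some r => some r
  | none => fwpLoop2 word_pairs

-- ===== PORT B =====
-- single pass carrying the fallback accumulator
def fwpScan : List (String × String) → Option String → Option String
  | [], fb => fb
  | p :: t, fb =>
    let good0 := !(PySem.Str.startswith p.1 "//t")
    let good1 := !(PySem.Str.startswith p.2 "//t")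
    if good0 && good1 then some (PySem.Str.join " " [p.1, p.2])
    else
      match fb with
      | none =>
        if good0 then fwpScan t (some (PySem.Str.join " |" [p.1, p.2]))
        else if good1 then fwpScan t (some (PySem.Str.join " |" [p.2, p.1]))
        else fwpScan t none
      | some s => fwpScan t (some s)

def find_word_pair_alt (word_pairs : List (String × String)) : Option String :=
  fwpScan word_pairs none

-- ===== PRECONDITION & SPEC =====
def Spec_find_word_pair (word_pairs : List (String × String)) (out : Option String) : Prop := out = find_word_pair_alt word_pairs
instance (word_pairs : List (String × String)) (out : Option String) : Decidable (Spec_find_word_pair word_pairs out) := by unfold Spec_find_word_pair; infer_instance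

-- ===== CLAIM (what is proved, stated in full; the proofs are below) =====
def Claim_equal_find_word_pair : Prop := ∀ (word_pairs : List (String × String)), Dom_find_word_pair word_pairs → Spec_find_word_pair word_pairs (find_word_pair word_pairs)

-- ===== LEMMAS AND PROOFS =====

-- Invariant of B's single pass: it yields the first fully-good pair if any,
-- otherwise the carried fallback, otherwise A's second-scan result.
theorem fwpScan_eq (t : List (String × String)) :
    ∀ fb : Option String,
      fwpScan t fb =
        match fwpLoop1 t with
        | some r => some r
        | none => fb.or (fwpLoop2 t) := by
  induction t with
  | nil => intro fb; cases fb <;> simp [fwpScan, fwpLoop1, fwpLoop2]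
  | cons p t ih =>
    intro fb
    by_cases h0 : PySem.Chars.startswith p.1.toList ['/', '/', 't'] = false <;>
      by_cases h1 : PySem.Chars.startswith p.2.toList ['/', '/', 't'] = false <;>
        cases fb <;>
          simp [fwpScan, fwpLoop1, fwpLoop2, h0, h1, ih] <;>
            cases fwpLoop1 t <;> simp

-- ===== VERDICT (by name: the statement is the Claim_ definition above) =====
theorem find_word_pair_spec : Claim_equal_find_word_pair := by
  intro wp _
  unfold Spec_find_word_pair find_word_pair find_word_pair_alt
  rw [fwpScan_eq]
  cases fwpLoop1 wp <;> simp
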